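-- pv_equiv track=rewrite | github.com/carlos-bernal-exa/SOCinthePocket | app/agents/response.py | _create_priority_matrix
-- ===== SOURCE A (Python) =====
-- from typing import Dict, Any, List, Optional
--
-- def _create_priority_matrix(actions: List[Dict]) -> Dict[str, List[Dict]]:
--     """Create priority matrix organizing actions by urgency and impact"""
--     matrix = {
--         "immediate_critical": [],
--         "immediate_high": [],
--         "hour_critical": [],
--         "hour_high": [],
--         "day_medium": []
--     }
--
--     for action in actions:
--         urgency = action.get("urgency", "day")
--         impact = action.get("impact", "medium")
--
--         key = f"{urgency}_{impact}"
--         if key in matrix: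
--             matrix[key].append(action)
--         else:
--             matrix["day_medium"].append(action)
--
--     return matrix
-- ===== SOURCE B (Python) =====
-- _KEYS = ("immediate_critical", "immediate_high", "hour_critical", "hour_high", "day_medium")
--
-- def _norm_key(action):
--     key = f"{action.get('urgency', 'day')}_{action.get('impact', 'medium')}"
--     return key if key in _KEYS else "day_medium"
--
-- def _create_priority_matrix(actions):
--     """Create priority matrix organizing actions by urgency and impact"""
--     return {k: [a for a in actions if _norm_key(a) == k] for k in _KEYS}
-- ===== Notes on version B (the rewrite author's own statement) =====
-- stated objective: alternative
-- what changed: Replaces the single bucket-on-write pass that appends each action into a mutable dict with a normalized-key helper plus five independent filter comprehensions, one per matrix bucket.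
import Mathlib
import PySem

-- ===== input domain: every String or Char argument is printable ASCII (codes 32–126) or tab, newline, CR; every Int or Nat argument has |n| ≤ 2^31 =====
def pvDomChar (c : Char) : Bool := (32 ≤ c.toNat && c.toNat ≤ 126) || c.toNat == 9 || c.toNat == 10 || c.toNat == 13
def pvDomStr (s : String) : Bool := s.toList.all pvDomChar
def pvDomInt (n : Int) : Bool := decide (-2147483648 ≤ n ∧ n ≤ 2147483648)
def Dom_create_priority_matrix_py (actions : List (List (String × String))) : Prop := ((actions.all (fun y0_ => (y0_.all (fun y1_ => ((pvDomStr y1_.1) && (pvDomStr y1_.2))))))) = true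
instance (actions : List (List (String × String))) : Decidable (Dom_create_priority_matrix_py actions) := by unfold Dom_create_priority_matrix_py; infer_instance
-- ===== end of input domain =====

-- B buckets by a normalized key and builds each matrix entry as its own filter scan,
-- instead of A's single pass appending into a mutable dict; alternative decomposition, same cost.

-- ===== PORT A =====
-- A: one pass over actions, appending each action into the bucket named by its raw
-- "urgency_impact" key when that key exists in the matrix, else into "day_medium".
def create_priority_matrix_py (actions : List (List (String × String))) :
    List (String × List (List (String × String))) :=
  let matrix : PySem.Dict String (List (List (String × String))) :=
    PySem.Dict.ofList [("immediate_critical", []), ("immediate_high", []),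
                       ("hour_critical", []), ("hour_high", []), ("day_medium", [])]
  let final := actions.foldl (fun m action =>
    let urgency := (PySem.Dict.mk action).getD "urgency" "day"
    let impact := (PySem.Dict.mk action).getD "impact" "medium"
    let key := urgency ++ "_" ++ impact
    if m.contains key then m.modify key [] (· ++ [action])
    else m.modify "day_medium" [] (· ++ [action])) matrix
  final.items

-- ===== PORT B =====
def pvKeys5 : List String :=
  ["immediate_critical", "immediate_high", "hour_critical", "hour_high", "day_medium"]

def pvNormKey (action : List (String × String)) : String :=
  let key := (PySem.Dict.mk action).getD "urgency" "day" ++ "_" ++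
             (PySem.Dict.mk action).getD "impact" "medium"
  if key ∈ pvKeys5 then key else "day_medium"

def create_priority_matrix_py_alt (actions : List (List (String × String))) :
    List (String × List (List (String × String))) :=
  pvKeys5.map (fun k => (k, actions.filter (fun a => pvNormKey a == k)))

-- ===== PRECONDITION & SPEC =====
def Spec_create_priority_matrix_py (actions : List (List (String × String))) (out : List (String × List (List (String × String)))) : Prop := out = create_priority_matrix_py_alt actions
instance (actions : List (List (String × String))) (out : List (String × List (List (String × String)))) : Decidable (Spec_create_priority_matrix_py actions out) := by unfold Spec_create_priority_matrix_py; infer_instance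

-- ===== CLAIM (what is proved, stated in full; the proofs are below) =====
def Claim_equal_create_priority_matrix_py : Prop := ∀ (actions : List (List (String × String))), Dom_create_priority_matrix_py actions → Spec_create_priority_matrix_py actions (create_priority_matrix_py actions)

-- ===== LEMMAS AND PROOFS =====

-- the loop body of A, named for the proofs (the lets of the port beta-reduce to this)
def pvStep (m : PySem.Dict String (List (List (String × String))))
    (action : List (String × String)) : PySem.Dict String (List (List (String × String))) :=
  if m.contains ((PySem.Dict.mk action).getD "urgency" "day" ++ "_" ++
                 (PySem.Dict.mk action).getD "impact" "medium") then
    m.modify ((PySem.Dict.mk action).getD "urgency" "day" ++ "_" ++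
              (PySem.Dict.mk action).getD "impact" "medium") [] (· ++ [action])
  else m.modify "day_medium" [] (· ++ [action])

-- the initial matrix of A
def pvM0 : PySem.Dict String (List (List (String × String))) :=
  PySem.Dict.ofList [("immediate_critical", []), ("immediate_high", []),
                     ("hour_critical", []), ("hour_high", []), ("day_medium", [])]

lemma pvKeys_step (m : PySem.Dict String (List (List (String × String))))
    (a : List (String × String)) (h : m.keys = pvKeys5) : (pvStep m a).keys = pvKeys5 := by
  unfold pvStep
  by_cases hc : m.contains ((PySem.Dict.mk a).getD "urgency" "day" ++ "_" ++
      (PySem.Dict.mk a).getD "impact" "medium") = true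
  · rw [if_pos hc, PySem.Dict.keys_modify, PySem.Dict.keys_insert_of_contains _ _ hc, h]
  · have hday : m.contains "day_medium" = true := by
      rw [PySem.Dict.contains_eq_decide_mem_keys, h]; decide
    rw [if_neg hc, PySem.Dict.keys_modify, PySem.Dict.keys_insert_of_contains _ _ hday, h]

lemma pvKeys_fold (actions : List (List (String × String)))
    (m : PySem.Dict String (List (List (String × String)))) (h : m.keys = pvKeys5) :
    (actions.foldl pvStep m).keys = pvKeys5 := by
  induction actions generalizing m with
  | nil => exact h
  | cons a as ih => exact ih _ (pvKeys_step m a h)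

lemma pvStep_getD (m : PySem.Dict String (List (List (String × String))))
    (a : List (String × String)) (h : m.keys = pvKeys5) (k : String) :
    (pvStep m a).getD k [] = m.getD k [] ++ (if pvNormKey a == k then [a] else []) := by
  have hcont : ∀ s : String, m.contains s = decide (s ∈ pvKeys5) := by
    intro s
    rw [PySem.Dict.contains_eq_decide_mem_keys, h]
  unfold pvStep
  by_cases hc : m.contains ((PySem.Dict.mk a).getD "urgency" "day" ++ "_" ++
      (PySem.Dict.mk a).getD "impact" "medium") = true
  · rw [if_pos hc]
    have hmem : ((PySem.Dict.mk a).getD "urgency" "day" ++ "_" ++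
        (PySem.Dict.mk a).getD "impact" "medium") ∈ pvKeys5 := by
      rw [hcont] at hc; exact of_decide_eq_true hc
    have hn : pvNormKey a = (PySem.Dict.mk a).getD "urgency" "day" ++ "_" ++
        (PySem.Dict.mk a).getD "impact" "medium" := by
      unfold pvNormKey; rw [if_pos hmem]
    rw [hn, PySem.Dict.getD_modify]
    by_cases he : k = (PySem.Dict.mk a).getD "urgency" "day" ++ "_" ++
        (PySem.Dict.mk a).getD "impact" "medium"
    · rw [if_pos he, he, if_pos (beq_self_eq_true _)]
    · rw [if_neg he, if_neg, List.append_nil]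
      exact fun hbe => he (eq_of_beq hbe).symm
  · rw [if_neg hc]
    have hmem : ¬ ((PySem.Dict.mk a).getD "urgency" "day" ++ "_" ++
        (PySem.Dict.mk a).getD "impact" "medium") ∈ pvKeys5 := by
      rw [hcont] at hc; exact fun hm => hc (decide_eq_true hm)
    have hn : pvNormKey a = "day_medium" := by
      unfold pvNormKey; rw [if_neg hmem]
    rw [hn, PySem.Dict.getD_modify]
    by_cases he : k = "day_medium"
    · rw [if_pos he, he, if_pos (beq_self_eq_true _)]
    · rw [if_neg he, if_neg, List.append_nil]
      exact fun hbe => he (eq_of_beq hbe).symm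

lemma pvGetD_fold (actions : List (List (String × String)))
    (m : PySem.Dict String (List (List (String × String)))) (h : m.keys = pvKeys5)
    (k : String) :
    (actions.foldl pvStep m).getD k [] =
      m.getD k [] ++ actions.filter (fun a => pvNormKey a == k) := by
  induction actions generalizing m with
  | nil => simp
  | cons a as ih =>
    rw [List.foldl_cons, List.filter_cons, ih (pvStep m a) (pvKeys_step m a h),
        pvStep_getD m a h k]
    split_ifs <;> simp

lemma pvM0_keys : pvM0.keys = pvKeys5 := by decide

lemma pvM0_getD (k : String) : pvM0.getD k [] = [] := by
  rw [PySem.Dict.getD_eq_get?_getD]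
  by_cases hk : k ∈ pvKeys5
  · fin_cases hk <;> rfl
  · have hnone : pvM0.get? k = none := by
      rw [PySem.Dict.get?_eq_none_iff_not_mem_keys, pvM0_keys]
      exact hk
    rw [hnone]; rfl

-- ===== VERDICT (by name: the statement is the Claim_ definition above) =====
theorem create_priority_matrix_py_spec : Claim_equal_create_priority_matrix_py := by
  intro actions _
  unfold Spec_create_priority_matrix_py create_priority_matrix_py create_priority_matrix_py_alt
  show (actions.foldl pvStep pvM0).items = _
  have hkeys := pvKeys_fold actions pvM0 pvM0_keys
  rw [PySem.Dict.items_eq_map_keys _ (by rw [hkeys]; decide) [], hkeys]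
  apply List.map_congr_left
  intro k _
  rw [pvGetD_fold actions pvM0 pvM0_keys k, pvM0_getD, List.nil_append]
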